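-- pv_equiv track=rewrite | github.com/ricosr/practive_every_day | if_duplicate.py | if_duplicate1
-- ===== SOURCE A (Python) =====
-- def if_duplicate1(input_list):
--     list_length = len(input_list)
--
--     if list_length == 0:
--         return False
--
--     for num in input_list:
--         if num < 0 or num > list_length-1:
--             return False
--
--     sort_list = sorted(input_list)
--     for i in range(list_length):
--         if i < list_length - 1 and sort_list[i] == sort_list[i+1]:
--             return True
--     return False
-- ===== SOURCE B (Python) =====
-- def if_duplicate1(input_list):
--     n = len(input_list)
--     if n == 0:
--         return False
--     for num in input_list:
--         if num < 0 or num > n - 1: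
--             return False
--     seen = [False] * n
--     for num in input_list:
--         if seen[num]:
--             return True
--         seen[num] = True
--     return False
-- ===== Notes on version B (the rewrite author's own statement) =====
-- stated objective: alternative
-- what changed: Replaces the comparison sort plus adjacent-pair scan with a single pass over a direct-address boolean table indexed by the (already range-validated) values; cost is comparable on the measured inputs.
import Mathlib
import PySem

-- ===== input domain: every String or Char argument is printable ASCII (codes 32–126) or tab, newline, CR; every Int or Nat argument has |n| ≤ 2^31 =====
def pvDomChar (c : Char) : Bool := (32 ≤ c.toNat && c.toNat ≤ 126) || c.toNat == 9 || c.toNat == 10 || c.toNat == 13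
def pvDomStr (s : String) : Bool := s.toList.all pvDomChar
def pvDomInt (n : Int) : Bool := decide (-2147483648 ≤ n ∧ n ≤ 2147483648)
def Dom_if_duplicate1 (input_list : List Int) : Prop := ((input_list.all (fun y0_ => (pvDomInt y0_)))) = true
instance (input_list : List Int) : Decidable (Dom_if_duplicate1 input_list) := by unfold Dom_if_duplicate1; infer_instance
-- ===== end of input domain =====

-- B replaces A's sort + adjacent-pair scan with a one-pass direct-address boolean table.

-- ===== PORT A =====
def if_duplicate1 (input_list : List Int) : Bool :=
  let list_length := input_list.length
  if list_length = 0 then false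
  else if input_list.any (fun num => decide (num < 0) || decide (num > (list_length : Int) - 1)) then false
  else
    let sort_list := PySem.List.sorted input_list (fun x => x) false
    (PySem.List.pyRange 0 (list_length : Int) 1).any (fun i =>
      decide (i < (list_length : Int) - 1) &&
        (PySem.List.pyGet? sort_list i == PySem.List.pyGet? sort_list (i + 1)))

-- ===== PORT B =====
def altLoop (xs : List Int) (seen : List Bool) : Bool :=
  match xs with
  | [] => false
  | num :: rest =>
    if seen.getD num.toNat false then true
    else altLoop rest (seen.set num.toNat true)

def if_duplicate1_alt (input_list : List Int) : Bool :=
  let n := input_list.length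
  if n = 0 then false
  else if input_list.any (fun num => decide (num < 0) || decide (num > (n : Int) - 1)) then false
  else altLoop input_list (List.replicate n false)

-- ===== PRECONDITION & SPEC =====
def Spec_if_duplicate1 (input_list : List Int) (out : Bool) : Prop := out = if_duplicate1_alt input_list
instance (input_list : List Int) (out : Bool) : Decidable (Spec_if_duplicate1 input_list out) := by unfold Spec_if_duplicate1; infer_instance

-- ===== CLAIM (what is proved, stated in full; the proofs are below) =====
def Claim_equal_if_duplicate1 : Prop := ∀ (input_list : List Int), Dom_if_duplicate1 input_list → Spec_if_duplicate1 input_list (if_duplicate1 input_list)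

-- ===== LEMMAS AND PROOFS =====

-- A's adjacent-pair scan on the sorted list detects a duplicate iff the input has one.
lemma scanA_eq (xs : List Int) :
    ((PySem.List.pyRange 0 (xs.length : Int) 1).any (fun i =>
      decide (i < (xs.length : Int) - 1) &&
        (PySem.List.pyGet? (PySem.List.sorted xs (fun x => x) false) i ==
         PySem.List.pyGet? (PySem.List.sorted xs (fun x => x) false) (i + 1)))) = decide (¬ xs.Nodup) := by
  set s := PySem.List.sorted xs (fun x => x) false with hs
  have hperm : s.Perm xs := PySem.List.sorted_perm xs (fun x => x) false
  have hlen : s.length = xs.length := hperm.length_eq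
  have hpair : s.Pairwise (fun a b => a ≤ b) := PySem.List.sorted_pairwise xs (fun x => x)
  have hnd : s.Nodup ↔ xs.Nodup := hperm.nodup_iff
  rw [Bool.eq_iff_iff]
  rw [← hlen, PySem.List.pyRange_zero_nat, List.any_map, List.any_eq_true]
  simp only [Function.comp, List.mem_range, Bool.and_eq_true, decide_eq_true_eq, beq_iff_eq]
  constructor
  · rintro ⟨k, hk, hlt, heq⟩
    have hk1 : k + 1 < s.length := by omega
    rw [show ((k : Int) + 1) = ((k + 1 : Nat) : Int) by push_cast; ring] at heq
    rw [PySem.List.pyGet?_natCast, PySem.List.pyGet?_natCast] at heq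
    rw [List.getElem?_eq_getElem (by omega), List.getElem?_eq_getElem hk1] at heq
    have heq' : s[k] = s[k+1] := Option.some.inj heq
    intro hnod
    have := (List.pairwise_iff_getElem.mp ((hnd.mpr hnod))) k (k+1) (by omega) hk1 (by omega)
    exact this heq'
  · intro h
    have hnods : ¬ s.Nodup := fun hn => h (hnd.mp hn)
    rw [List.Nodup, List.pairwise_iff_getElem] at hnods
    push_neg at hnods
    obtain ⟨i, j, hi, hj, hij, heq⟩ := hnods
    have hadj : s[i] = s[i+1]'(by omega) := by
      have h1 : s[i] ≤ s[i+1]'(by omega) :=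
        (List.pairwise_iff_getElem.mp hpair) i (i+1) hi (by omega) (by omega)
      have h2 : s[i+1]'(by omega) ≤ s[j] := by
        rcases Nat.eq_or_lt_of_le (Nat.succ_le_of_lt hij) with hcase | hcase
        · subst hcase; exact le_refl _
        · exact (List.pairwise_iff_getElem.mp hpair) (i+1) j (by omega) hj hcase
      have h3 : s[i+1]'(by omega) ≤ s[i] := by rw [heq]; exact h2
      exact le_antisymm h1 h3
    refine ⟨i, by omega, by push_cast; omega, ?_⟩
    rw [show ((i : Int) + 1) = ((i + 1 : Nat) : Int) by push_cast; ring]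
    rw [PySem.List.pyGet?_natCast, PySem.List.pyGet?_natCast,
      List.getElem?_eq_getElem hi, List.getElem?_eq_getElem (by omega)]
    exact congrArg some hadj

lemma getD_set_bool (l : List Bool) (j i : Nat) (hj : j < l.length) :
    (l.set j true).getD i false = if i = j then true else l.getD i false := by
  by_cases h : i = j
  · simp [List.getD_eq_getElem?_getD, List.getElem?_set, h, hj]
  · simp [List.getD_eq_getElem?_getD, List.getElem?_set, h, Ne.symm h]

-- B's loop invariant: it finds a duplicate iff the suffix has one or one is marked seen.
lemma altLoop_spec (xs : List Int) (seen : List Bool)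
    (hx : ∀ x ∈ xs, 0 ≤ x ∧ x.toNat < seen.length) :
    altLoop xs seen = true ↔ (¬ xs.Nodup ∨ ∃ x ∈ xs, seen.getD x.toNat false = true) := by
  induction xs generalizing seen with
  | nil => simp [altLoop]
  | cons a rest ih =>
    have ha := hx a (List.mem_cons_self)
    by_cases h : seen.getD a.toNat false = true
    · have hB : altLoop (a :: rest) seen = true := by
        simp only [altLoop]; rw [if_pos h]
      rw [hB]
      exact ⟨fun _ => Or.inr ⟨a, List.mem_cons_self, h⟩, fun _ => rfl⟩
    · have hB : altLoop (a :: rest) seen = altLoop rest (seen.set a.toNat true) := by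
        simp only [altLoop]; rw [if_neg h]
      rw [hB, ih (seen.set a.toNat true) (by
        intro x hxm
        have := hx x (List.mem_cons_of_mem a hxm)
        simpa using this)]
      have hset : ∀ x ∈ rest, (seen.set a.toNat true).getD x.toNat false =
          if x.toNat = a.toNat then true else seen.getD x.toNat false := by
        intro x _; exact getD_set_bool seen a.toNat x.toNat ha.2
      constructor
      · rintro (hnod | ⟨x, hxm, hxv⟩)
        · exact Or.inl (by simp [List.nodup_cons]; intro _; exact hnod)
        · rw [hset x hxm] at hxv
          by_cases hxa : x.toNat = a.toNat
          · have hx0 := (hx x (List.mem_cons_of_mem a hxm)).1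
            have : x = a := by omega
            subst this
            exact Or.inl (by simp [List.nodup_cons]; intro hc; exact absurd hxm hc)
          · rw [if_neg hxa] at hxv
            exact Or.inr ⟨x, List.mem_cons_of_mem a hxm, hxv⟩
      · rintro (hnod | ⟨x, hxm, hxv⟩)
        · rw [List.nodup_cons] at hnod
          push_neg at hnod
          by_cases hmem : a ∈ rest
          · refine Or.inr ⟨a, hmem, ?_⟩
            rw [hset a hmem, if_pos rfl]
          · exact Or.inl (hnod hmem)
        · rcases List.mem_cons.mp hxm with rfl | hxm'
          · exact absurd hxv h
          · refine Or.inr ⟨x, hxm', ?_⟩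
            rw [hset x hxm']
            by_cases hxa : x.toNat = a.toNat
            · rw [if_pos hxa]
            · rw [if_neg hxa]; exact hxv

lemma loopB_eq (xs : List Int)
    (hx : ∀ x ∈ xs, 0 ≤ x ∧ x.toNat < xs.length) :
    altLoop xs (List.replicate xs.length false) = decide (¬ xs.Nodup) := by
  rw [Bool.eq_iff_iff]
  rw [altLoop_spec xs _ (by simpa using hx)]
  simp [List.getD_eq_getElem?_getD, List.getElem?_replicate]
  intro x _ h
  split_ifs at h <;> simp_all

-- ===== VERDICT (by name: the statement is the Claim_ definition above) =====
theorem if_duplicate1_spec : Claim_equal_if_duplicate1 := by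
  intro xs _
  show if_duplicate1 xs = if_duplicate1_alt xs
  simp only [if_duplicate1, if_duplicate1_alt]
  by_cases h0 : xs.length = 0
  · rw [if_pos h0, if_pos h0]
  · rw [if_neg h0, if_neg h0]
    by_cases hr : (xs.any fun num => decide (num < 0) || decide (num > (xs.length : Int) - 1)) = true
    · rw [if_pos hr, if_pos hr]
    · rw [if_neg hr, if_neg hr]
      have hrf : (xs.any fun num => decide (num < 0) || decide (num > (xs.length : Int) - 1)) = false :=
        Bool.eq_false_iff.mpr hr
      rw [scanA_eq, loopB_eq]
      intro x hxm
      have := List.any_eq_false.mp hrf x hxm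
      simp only [Bool.or_eq_true, decide_eq_true_eq, not_or] at this
      constructor
      · omega
      · omega
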